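-- pv_equiv track=rewrite | github.com/gonefabi/Kalender--6-Semster- | app/services/scheduling.py | _segment_duration
-- ===== SOURCE A (Python) =====
-- MAX_BLOCK_MINUTES = 120
--
-- MIN_BLOCK_MINUTES = 15
--
-- def _segment_duration(total_minutes: int) -> list[int]:
--     remaining = max(total_minutes, MIN_BLOCK_MINUTES)
--     chunks: list[int] = []
--     while remaining > 0:
--         chunk = min(MAX_BLOCK_MINUTES, remaining)
--         remainder = remaining - chunk
--         if 0 < remainder < MIN_BLOCK_MINUTES:
--             deficit = MIN_BLOCK_MINUTES - remainder
--             adjustment = min(deficit, chunk - MIN_BLOCK_MINUTES)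
--             chunk -= adjustment
--             remainder = remaining - chunk
--         chunk = max(MIN_BLOCK_MINUTES, min(chunk, remaining))
--         chunks.append(chunk)
--         remaining -= chunk
--     return chunks
-- ===== SOURCE B (Python) =====
-- def _segment_duration(total_minutes: int) -> list[int]:
--     r = max(total_minutes, 15)
--     k = (r - 15) // 120
--     v = r - 120 * k
--     blocks = [120] * k
--     if v > 120:
--         blocks += [v - 15, 15]
--     else:
--         blocks.append(v)
--     return blocks
-- ===== Notes on version B (the rewrite author's own statement) =====
-- stated objective: simpler
-- what changed: Replaces the iterative subtract-and-append loop with closed-form arithmetic: the number of full-size blocks comes from one floor division and the list is built directly by repetition plus a computed one- or two-block tail.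
import Mathlib
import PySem

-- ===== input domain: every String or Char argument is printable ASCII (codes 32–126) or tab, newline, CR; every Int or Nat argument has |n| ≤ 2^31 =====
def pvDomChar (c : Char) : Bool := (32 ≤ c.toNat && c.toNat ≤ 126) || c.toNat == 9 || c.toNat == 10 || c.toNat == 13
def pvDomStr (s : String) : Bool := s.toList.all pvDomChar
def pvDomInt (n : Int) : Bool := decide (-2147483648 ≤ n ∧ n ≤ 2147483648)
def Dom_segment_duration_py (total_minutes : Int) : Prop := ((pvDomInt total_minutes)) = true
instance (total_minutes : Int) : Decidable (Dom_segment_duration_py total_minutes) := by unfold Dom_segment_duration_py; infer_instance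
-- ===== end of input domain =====

-- B replaces A's subtract-and-append loop with closed-form arithmetic (full-block count by floor division, tail built directly); objective: simpler.

-- ===== PORT A =====
-- the while loop of _segment_duration, step for step; fuel only makes the
-- recursion structural (each iteration subtracts chunk >= 15 > 0, so
-- remaining.toNat iterations always suffice)
def segLoopA (fuel : Nat) (remaining : Int) : List Int :=
  match fuel with
  | 0 => []
  | fuel + 1 =>
    if remaining > 0 then
      let chunk0 : Int := min 120 remaining
      let remainder0 : Int := remaining - chunk0
      let chunk1 : Int :=
        if 0 < remainder0 ∧ remainder0 < 15 then
          chunk0 - min (15 - remainder0) (chunk0 - 15)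
        else chunk0
      let chunk : Int := max 15 (min chunk1 remaining)
      chunk :: segLoopA fuel (remaining - chunk)
    else []

def segment_duration_py (total_minutes : Int) : List Int :=
  segLoopA (max total_minutes 15).toNat (max total_minutes 15)

-- ===== PORT B =====
def segment_duration_py_alt (total_minutes : Int) : List Int :=
  let r : Int := max total_minutes 15
  let k : Int := PySem.Int.floordiv (r - 15) 120
  let v : Int := r - 120 * k
  let blocks : List Int := List.replicate k.toNat 120
  if v > 120 then blocks ++ [v - 15, 15] else blocks ++ [v]

-- ===== PRECONDITION & SPEC =====
def Spec_segment_duration_py (total_minutes : Int) (out : List Int) : Prop := out = segment_duration_py_alt total_minutes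
instance (total_minutes : Int) (out : List Int) : Decidable (Spec_segment_duration_py total_minutes out) := by unfold Spec_segment_duration_py; infer_instance

-- ===== CLAIM (what is proved, stated in full; the proofs are below) =====
def Claim_equal_segment_duration_py : Prop := ∀ (total_minutes : Int), Dom_segment_duration_py total_minutes → Spec_segment_duration_py total_minutes (segment_duration_py total_minutes)

-- ===== LEMMAS AND PROOFS =====

-- closed form of B on r ≥ 15, expressed through r only
def altOf (r : Int) : List Int :=
  let k : Int := PySem.Int.floordiv (r - 15) 120
  let v : Int := r - 120 * k
  if v > 120 then List.replicate k.toNat 120 ++ [v - 15, 15] else List.replicate k.toNat 120 ++ [v]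

theorem floordiv_small {r : Int} (h1 : 15 ≤ r) (h2 : r < 135) :
    PySem.Int.floordiv (r - 15) 120 = 0 := by
  rw [PySem.Int.floordiv_eq_ediv_of_pos (by norm_num)]
  omega

theorem floordiv_step {r : Int} (_h : 135 ≤ r) :
    PySem.Int.floordiv (r - 15) 120 = PySem.Int.floordiv (r - 135) 120 + 1 := by
  rw [PySem.Int.floordiv_eq_ediv_of_pos (by norm_num),
      PySem.Int.floordiv_eq_ediv_of_pos (by norm_num)]
  omega

theorem segLoopA_nonpos (n : Nat) (r : Int) (h : ¬ r > 0) : segLoopA n r = [] := by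
  cases n with
  | zero => rfl
  | succ n => rw [segLoopA, if_neg h]

theorem segLoopA_fifteen (n : Nat) (h : 1 ≤ n) : segLoopA n 15 = [15] := by
  match n, h with
  | n + 1, _ =>
    rw [segLoopA]
    norm_num
    exact segLoopA_nonpos n 0 (by norm_num)

theorem segLoopA_eq_altOf_fuel (n : Nat) : ∀ (r : Int), r.toNat ≤ n → 15 ≤ r → segLoopA n r = altOf r := by
  induction n with
  | zero => intro r hn hr; omega
  | succ n ih =>
    intro r hn hr
    by_cases hbig : 135 ≤ r
    · -- one full 120 block, recurse on r - 120
      have step : segLoopA (n + 1) r = 120 :: segLoopA n (r - 120) := by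
        rw [segLoopA]
        have hpos : r > 0 := by omega
        rw [if_pos hpos]
        have hm : min (120:Int) r = 120 := by omega
        have hrem : ¬ (0 < r - 120 ∧ r - 120 < 15) := by omega
        simp only [hm, if_neg hrem]
        norm_num
      rw [step, ih (r - 120) (by omega) (by omega)]
      unfold altOf
      simp only
      rw [floordiv_step hbig]
      have h0 : (0:Int) ≤ PySem.Int.floordiv (r - 135) 120 := by
        rw [PySem.Int.floordiv_eq_ediv_of_pos (by norm_num)]
        exact Int.ediv_nonneg (by omega) (by norm_num)
      have hv : r - 120 * (PySem.Int.floordiv (r - 135) 120 + 1)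
              = (r - 120) - 120 * PySem.Int.floordiv (r - 135) 120 := by ring
      have htn : (PySem.Int.floordiv (r - 135) 120 + 1).toNat
               = (PySem.Int.floordiv (r - 135) 120).toNat + 1 := by omega
      rw [hv, htn, List.replicate_succ]
      have h135 : r - 135 = (r - 120) - 15 := by ring
      rw [h135]
      split_ifs <;> simp
    · -- 15 ≤ r < 135: at most two blocks
      have hk := floordiv_small hr (by omega)
      by_cases hmid : 120 < r
      · -- tail [r-15, 15]
        have step1 : segLoopA (n + 1) r = (r - 15) :: segLoopA n 15 := by
          rw [segLoopA]
          have hpos : r > 0 := by omega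
          rw [if_pos hpos]
          have hm : min (120:Int) r = 120 := by omega
          have hrem : (0 < r - 120 ∧ r - 120 < 15) := by omega
          simp only [hm, if_pos hrem]
          have hadj : min (15 - (r - 120)) ((120:Int) - 15) = 15 - (r - 120) := by omega
          rw [hadj]
          have hc : (120:Int) - (15 - (r - 120)) = r - 15 := by ring
          rw [hc]
          have hmax : max (15:Int) (min (r - 15) r) = r - 15 := by omega
          rw [hmax]
          have hrest : r - (r - 15) = 15 := by ring
          rw [hrest]
        rw [step1, segLoopA_fifteen n (by omega)]
        unfold altOf
        simp only
        rw [hk]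
        have hv0 : r - 120 * 0 = r := by ring
        rw [hv0, if_pos hmid]
        simp
      · -- single block [r]
        have step1 : segLoopA (n + 1) r = r :: segLoopA n 0 := by
          rw [segLoopA]
          have hpos : r > 0 := by omega
          rw [if_pos hpos]
          have hm : min (120:Int) r = r := by omega
          have hrem : ¬ (0 < r - r ∧ r - r < 15) := by omega
          simp only [hm, if_neg hrem]
          have h1 : max (15:Int) (min r r) = r := by omega
          rw [h1]
          have h2 : r - r = 0 := by ring
          rw [h2]
        rw [step1, segLoopA_nonpos n 0 (by norm_num)]
        unfold altOf
        simp only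
        rw [hk]
        have hv0 : r - 120 * 0 = r := by ring
        rw [hv0, if_neg (by omega)]
        simp

-- ===== VERDICT (by name: the statement is the Claim_ definition above) =====
theorem segment_duration_py_spec : Claim_equal_segment_duration_py := by
  intro t _
  unfold Spec_segment_duration_py segment_duration_py segment_duration_py_alt
  rw [segLoopA_eq_altOf_fuel (max t 15).toNat (max t 15) le_rfl (le_max_right _ _)]
  unfold altOf
  simp only
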